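-- pv_equiv track=rewrite | github.com/hcoa/cf-problems | 1-100/1b.py | isCoordinates
-- ===== SOURCE A (Python) =====
-- def isNum(s):
--     return ord(s) >= 48 and ord(s) <= 57
--
-- def isCoordinates(row):
--     if not row.startswith('R'):
--         return False
--     i = 1
--     while i < len(row):
--         if isNum(row[i-1]) and row[i] == 'C':
--             return True
--         i += 1
--     return False
-- ===== SOURCE B (Python) =====
-- def isCoordinates(row):
--     # Stage 1: cut the string at every 'C'; stage 2: a digit immediately before
--     # some 'C' means some non-final piece ends in a digit.
--     return row.startswith('R') and any(
--         piece and piece[-1].isdigit() for piece in row.split('C')[:-1]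
--     )
-- ===== Notes on version B (the rewrite author's own statement) =====
-- stated objective: alternative
-- what changed: Replaced A's index-based while-loop over adjacent characters by a two-stage pass: split the string at every 'C' and test whether any non-final piece ends in a digit.
import Mathlib
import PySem

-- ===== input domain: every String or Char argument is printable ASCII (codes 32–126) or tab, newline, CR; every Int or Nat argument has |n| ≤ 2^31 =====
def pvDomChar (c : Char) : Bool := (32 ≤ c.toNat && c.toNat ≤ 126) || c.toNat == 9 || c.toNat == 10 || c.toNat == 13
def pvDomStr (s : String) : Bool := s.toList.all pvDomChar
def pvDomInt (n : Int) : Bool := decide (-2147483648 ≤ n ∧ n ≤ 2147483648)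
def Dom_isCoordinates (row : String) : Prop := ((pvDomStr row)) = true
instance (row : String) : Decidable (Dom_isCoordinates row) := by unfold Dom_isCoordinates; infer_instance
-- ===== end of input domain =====

-- ===== PORT A =====
-- B replaces A's index-based while loop by a two-stage pass: split at every 'C',
-- then test whether some non-final piece ends in a digit; alternative, same cost.
def isNum (s : Char) : Bool := 48 ≤ s.toNat && s.toNat ≤ 57

-- the while loop of A; indices accessed are always in range, so getD is exact here
def isCoordinatesLoop (cs : List Char) (i : Nat) : Bool :=
  if _h : i < cs.length then
    if isNum (cs.getD (i - 1) 'R') && (cs.getD i 'R' == 'C') then true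
    else isCoordinatesLoop cs (i + 1)
  else false
termination_by cs.length - i

def isCoordinates (row : String) : Bool :=
  if !(PySem.Str.startswith row "R") then false
  else isCoordinatesLoop row.toList 1

-- ===== PORT B =====
def isCoordinates_alt (row : String) : Bool :=
  PySem.Str.startswith row "R" &&
    ((PySem.Chars.splitOn row.toList "C".toList).dropLast).any
      (fun piece => !piece.isEmpty && (piece.getLastD ' ').isDigit)

-- ===== PRECONDITION & SPEC =====
def Spec_isCoordinates (row : String) (out : Bool) : Prop := out = isCoordinates_alt row
instance (row : String) (out : Bool) : Decidable (Spec_isCoordinates row out) := by unfold Spec_isCoordinates; infer_instance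

-- ===== CLAIM (what is proved, stated in full; the proofs are below) =====
def Claim_equal_isCoordinates : Prop := ∀ (row : String), Dom_isCoordinates row → Spec_isCoordinates row (isCoordinates row)

-- ===== LEMMAS AND PROOFS =====

-- the adjacent-pair characterisation both ports are reduced to
def pairScan (cs : List Char) : Bool :=
  (cs.zip cs.tail).any (fun p => p.1.isDigit && (p.2 == 'C'))

-- the non-final piece test of B
def pieceTest (piece : List Char) : Bool := !piece.isEmpty && (piece.getLastD ' ').isDigit

-- recursive specification of splitting on 'C'
def sp (cs : List Char) : List (List Char) :=
  match cs with
  | [] => [[]]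
  | c :: rest => if c = 'C' then [] :: sp rest else (sp rest).modifyHead (c :: ·)

theorem isNum_eq (c : Char) : isNum c = c.isDigit := by
  simp only [isNum, Char.isDigit, UInt32.le_iff_toNat_le, Char.toNat_val]
  rw [show ('0' : Char).toNat = 48 from rfl, show ('9' : Char).toNat = 57 from rfl]

theorem loop_eq (cs : List Char) (n : Nat) :
    isCoordinatesLoop cs (n + 1)
      = ((cs.zip cs.tail).drop n).any (fun p => isNum p.1 && p.2 == 'C') := by
  rw [isCoordinatesLoop]
  by_cases h : n + 1 < cs.length
  · have hz : n < (cs.zip cs.tail).length := by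
      simp only [List.length_zip, List.length_tail]; omega
    rw [List.drop_eq_getElem_cons hz]
    have h0 : n < cs.length := by omega
    have h1 : (cs.zip cs.tail)[n] = (cs[n], cs[n+1]) := by
      simp [List.getElem_zip, List.getElem_tail]
    simp only [h, dif_pos, h1, List.any_cons]
    rw [loop_eq cs (n + 1)]
    have hg1 : cs.getD (n + 1 - 1) 'R' = cs[n] := by
      simp [List.getD_eq_getElem?_getD, h0]
    have hg2 : cs.getD (n + 1) 'R' = cs[n+1] := by
      simp [List.getD_eq_getElem?_getD, h]
    rw [hg1, hg2]
    simp only [show ∀ a : Char, (a == 'C') = decide (a = 'C') from fun _ => rfl]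
    by_cases hc : isNum cs[n] && (cs[n+1] == 'C') = true <;> simp_all
  · have hz : (cs.zip cs.tail).length ≤ n := by
      simp only [List.length_zip, List.length_tail]; omega
    rw [List.drop_eq_nil_of_le hz]
    simp [h]
termination_by cs.length - (n + 1)

theorem sp_ne_nil (cs : List Char) : sp cs ≠ [] := by
  cases cs with
  | nil => simp [sp]
  | cons c rest =>
    simp only [sp]
    split
    · simp
    · intro h
      have := sp_ne_nil rest
      cases hsp : sp rest with
      | nil => exact this hsp
      | cons a t => rw [hsp] at h; simp [List.modifyHead] at h

-- PySem's fuelled splitOn loop computes sp (for the one-character separator "C")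
theorem go_eq (l : List Char) (fuel : Nat) (cur : List Char) (acc : List (List Char))
    (hf : l.length < fuel) :
    PySem.Chars.splitOn.go ['C'] fuel l cur acc
      = acc.reverse ++ (sp l).modifyHead (cur.reverse ++ ·) := by
  cases fuel with
  | zero => omega
  | succ f =>
    cases l with
    | nil =>
      simp [PySem.Chars.splitOn.go, sp, List.modifyHead]
    | cons c rest =>
      rw [PySem.Chars.splitOn.go]
      by_cases hc : c = 'C'
      · subst hc
        have hpre : ['C'].isPrefixOf ('C' :: rest) = true := by simp [List.isPrefixOf]
        simp only [hpre, if_pos]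
        have hdrop : List.drop (['C'] : List Char).length ('C' :: rest) = rest := rfl
        rw [hdrop, go_eq rest f [] (cur.reverse :: acc) (by simpa using Nat.lt_of_succ_lt_succ hf)]
        simp only [sp, List.modifyHead, List.reverse_cons, List.append_assoc,
          List.cons_append, List.nil_append]
        cases sp rest <;> simp
      · have hpre : ['C'].isPrefixOf (c :: rest) = false := by
          simp only [List.isPrefixOf, Bool.and_true, beq_eq_false_iff_ne, ne_eq]
          exact fun h => hc h.symm
        simp only [hpre, Bool.false_eq_true, if_neg, not_false_iff]
        rw [go_eq rest f (c :: cur) acc (by simpa using Nat.lt_of_succ_lt_succ hf)]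
        have : (sp (c :: rest)).modifyHead (cur.reverse ++ ·)
            = (sp rest).modifyHead ((c :: cur).reverse ++ ·) := by
          simp only [sp, if_neg hc]
          cases hsp : sp rest with
          | nil => simp [List.modifyHead]
          | cons a t => simp [List.modifyHead]
        rw [this]

theorem splitOn_eq_sp (cs : List Char) : PySem.Chars.splitOn cs ['C'] = sp cs := by
  rw [PySem.Chars.splitOn, go_eq cs (cs.length + 1) [] [] (by omega)]
  cases hsp : sp cs with
  | nil => exact absurd hsp (sp_ne_nil cs)
  | cons a t => simp [List.modifyHead]

-- no 'C' in the list ⇒ no adjacent (digit, 'C') pair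
theorem pairScan_of_not_memC (l : List Char) (h : 'C' ∉ l) : pairScan l = false := by
  cases l with
  | nil => rfl
  | cons a rest =>
    cases rest with
    | nil => rfl
    | cons b rr =>
      have hb : ¬ (b = 'C') := fun hb => h (by simp [hb])
      have hrec : pairScan (b :: rr) = false :=
        pairScan_of_not_memC (b :: rr) (fun hm => h (List.mem_cons_of_mem a hm))
      simp only [pairScan, List.tail_cons, List.zip_cons_cons, List.any_cons] at hrec ⊢
      simp [hb, hrec]

-- splitting pairScan at a 'C' after a C-free prefix
theorem pairScan_append (p rest : List Char) (hp : 'C' ∉ p) :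
    pairScan (p ++ 'C' :: rest) = (pieceTest p || pairScan rest) := by
  cases p with
  | nil =>
    cases rest with
    | nil => rfl
    | cons r rr =>
      simp [pairScan, pieceTest]
  | cons a p' =>
    cases p' with
    | nil =>
      have h2 : pairScan ('C' :: rest) = pairScan rest := by
        cases rest with
        | nil => rfl
        | cons r rr => simp [pairScan]
      simp only [List.cons_append, List.nil_append]
      simp only [pairScan, List.tail_cons, List.zip_cons_cons, List.any_cons] at h2 ⊢
      simp only [pieceTest]
      simp [h2]
    | cons b p'' =>
      have hb : ¬ (b = 'C') := fun hb => hp (by simp [hb])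
      have hrec := pairScan_append (b :: p'') rest
        (fun hm => hp (List.mem_cons_of_mem a hm))
      simp only [List.cons_append] at hrec ⊢
      simp only [pairScan, List.tail_cons, List.zip_cons_cons, List.any_cons] at hrec ⊢
      simp only [pieceTest] at hrec ⊢
      simp [hb, hrec]

-- main bridge: B's split-and-test equals the adjacent-pair scan
theorem split_eq_pairScan (cs : List Char) (p : List Char) (hp : 'C' ∉ p) :
    (((sp cs).modifyHead (p ++ ·)).dropLast).any pieceTest = pairScan (p ++ cs) := by
  cases cs with
  | nil =>
    simp only [sp, List.modifyHead, List.append_nil, List.dropLast, List.any_nil]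
    exact (pairScan_of_not_memC p hp).symm
  | cons c rest =>
    by_cases hc : c = 'C'
    · subst hc
      cases hsp : sp rest with
      | nil => exact absurd hsp (sp_ne_nil rest)
      | cons a t =>
        have ih := split_eq_pairScan rest [] (by simp)
        rw [hsp] at ih
        simp only [List.modifyHead, List.nil_append] at ih
        have h1 : sp ('C' :: rest) = [] :: a :: t := by rw [sp]; simp [hsp]
        rw [h1]
        simp only [List.modifyHead, List.append_nil, List.dropLast_cons₂, List.any_cons]
        rw [ih, pairScan_append p rest hp]
    · have ih := split_eq_pairScan rest (p ++ [c])
        (by intro hm; rcases List.mem_append.mp hm with h1 | h1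
            · exact hp h1
            · exact hc (List.mem_singleton.mp h1).symm)
      simp only [sp, if_neg hc]
      have hmod : ((sp rest).modifyHead (c :: ·)).modifyHead (p ++ ·)
          = (sp rest).modifyHead ((p ++ [c]) ++ ·) := by
        cases hsp : sp rest with
        | nil => rfl
        | cons a t => simp [List.modifyHead]
      rw [hmod, ih]
      simp

-- ===== VERDICT (by name: the statement is the Claim_ definition above) =====
theorem isCoordinates_spec : Claim_equal_isCoordinates := by
  intro row _
  unfold Spec_isCoordinates isCoordinates isCoordinates_alt
  cases hb : PySem.Str.startswith row "R" with
  | false => simp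
  | true =>
    simp only [Bool.not_true, Bool.true_and]
    rw [if_neg (by simp)]
    rw [show (1 : Nat) = 0 + 1 from rfl, loop_eq, List.drop_zero]
    have hsp : ("C" : String).toList = ['C'] := rfl
    rw [hsp, splitOn_eq_sp]
    have hmain := split_eq_pairScan row.toList [] (by simp)
    rw [show (fun piece : List Char => !piece.isEmpty && (piece.getLastD ' ').isDigit)
          = pieceTest from rfl]
    cases h : sp row.toList with
    | nil => exact absurd h (sp_ne_nil row.toList)
    | cons a t =>
      rw [h] at hmain
      simp only [List.modifyHead, List.nil_append] at hmain
      rw [hmain]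
      simp [pairScan, isNum_eq]
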